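-- pv_equiv track=rewrite | github.com/leo-zhang-93/adventOfCode | 2024/script_20241221.py | calc_dist_num
-- ===== SOURCE A (Python) =====
-- grid1 = [
--     ['7', '8', '9'],
--     ['4', '5', '6'],
--     ['1', '2', '3'],
--     ['#', '0', 'A']
-- ]
--
-- dic_pos1 = {
--     '0': [3, 1],
--     '1': [2, 0],
--     '2': [2, 1],
--     '3': [2, 2],
--     '4': [1, 0],
--     '5': [1, 1],
--     '6': [1, 2],
--     '7': [0, 0],
--     '8': [0, 1],
--     '9': [0, 2],
--     'A': [3, 2],
-- }
--
-- directions = [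
--     [0, 1, '>'],
--     [0, -1, '<'],
--     [1, 0, 'v'],
--     [-1, 0, '^'],
-- ]
--
-- dic_paths1 = {}
--
-- def calc_dist_num(s, e):
--     """Calculates the path from s to e on the numeric pad."""
--     if s == e:
--         return ['']
--     if (s, e) in dic_paths1:
--         return dic_paths1[(s, e)]
--     sx, sy = dic_pos1[s]
--     ex, ey = dic_pos1[e]
--     res = []
--     for dx, dy, sign in directions:
--         xx = sx + dx
--         yy = sy + dy
--         if (0 <= xx < len(grid1) and 0 <= yy < len(grid1[0]) and grid1[xx][yy] != '#' and
--                 min(sx, ex) <= xx <= max(sx, ex) and min(sy, ey) <= yy <= max(sy, ey)):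
--             res += [sign + item for item in calc_dist_num(grid1[xx][yy], e)]
--     dic_paths1[(s, e)] = res
--     return res
-- ===== SOURCE B (Python) =====
-- dic_pos1 = {
--     '0': [3, 1], '1': [2, 0], '2': [2, 1], '3': [2, 2],
--     '4': [1, 0], '5': [1, 1], '6': [1, 2],
--     '7': [0, 0], '8': [0, 1], '9': [0, 2], 'A': [3, 2],
-- }
--
-- def calc_dist_num(s, e):
--     """Calculates the path from s to e on the numeric pad."""
--     if s == e:
--         return ['']
--     sx, sy = dic_pos1[s]
--     ex, ey = dic_pos1[e]
--     nh = abs(ey - sy)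
--     nv = abs(ex - sx)
--     hc = '>' if ey > sy else '<'
--     vc = 'v' if ex > sx else '^'
--     dxv = 1 if ex > sx else -1
--     dyh = 1 if ey > sy else -1
--     n = nh + nv
--     res = []
--     # Enumerate interleavings as n-bit masks, MSB = first move; bit 0 = horizontal,
--     # bit 1 = vertical.  Ascending mask order = horizontal-before-vertical DFS order.
--     for m in range(1 << n):
--         if bin(m).count('1') != nv:
--             continue
--         x, y = sx, sy
--         path = []
--         ok = True
--         for i in range(n):
--             if (m >> (n - 1 - i)) & 1:
--                 x += dxv
--                 path.append(vc)
--             else: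
--                 y += dyh
--                 path.append(hc)
--             if x == 3 and y == 0:  # the gap cell '#'
--                 ok = False
--                 break
--         if ok:
--             res.append(''.join(path))
--     return res
-- ===== Notes on version B (the rewrite author's own statement) =====
-- stated objective: alternative
-- what changed: Replaces A's memoized recursive DFS over keypad cells by a direct enumeration: look up the two positions, count horizontal/vertical moves, enumerate interleavings as ascending bitmasks (which reproduces the horizontal-first DFS order) and simulate each to discard those stepping on the gap cell.
import Mathlib
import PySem

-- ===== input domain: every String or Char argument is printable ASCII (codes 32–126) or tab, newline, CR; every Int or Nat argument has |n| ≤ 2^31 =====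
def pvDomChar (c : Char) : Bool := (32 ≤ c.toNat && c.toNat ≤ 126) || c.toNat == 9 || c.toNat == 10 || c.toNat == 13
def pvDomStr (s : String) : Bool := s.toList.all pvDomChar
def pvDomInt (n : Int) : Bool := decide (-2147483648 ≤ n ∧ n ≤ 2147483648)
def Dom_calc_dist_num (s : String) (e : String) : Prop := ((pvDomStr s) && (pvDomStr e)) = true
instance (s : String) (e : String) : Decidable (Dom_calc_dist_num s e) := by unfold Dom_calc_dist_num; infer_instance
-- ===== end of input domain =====

-- ===== PORT A =====
-- B differs from A only structurally; A also memoizes results in a global dict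
-- dic_paths1 (a side effect); the memo never changes the return value and is elided here.
def gridAt (x y : Int) : String :=
  ((PySem.List.pyGet? ((PySem.List.pyGet? ([["7","8","9"],["4","5","6"],["1","2","3"],["#","0","A"]] : List (List String)) x).getD []) y).getD "#")

def dicPos1 : PySem.Dict String (Int × Int) :=
  PySem.Dict.ofList [("0",(3,1)),("1",(2,0)),("2",(2,1)),("3",(2,2)),("4",(1,0)),
                     ("5",(1,1)),("6",(1,2)),("7",(0,0)),("8",(0,1)),("9",(0,2)),("A",(3,2))]

def directionsA : List (Int × Int × String) := [(0,1,">"),(0,-1,"<"),(1,0,"v"),(-1,0,"^")]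

-- fuel only makes the recursion total; on Pre_ inputs the distance to e is < 12
def calcA (fuel : Nat) (s e : String) : List String :=
  match fuel with
  | 0 => []
  | fuel + 1 =>
    if s = e then [""] else
    -- dic_pos1[s] raises KeyError for a non-key; those inputs are outside Pre_
    let p := (dicPos1.get? s).getD (0, 0)
    let q := (dicPos1.get? e).getD (0, 0)
    directionsA.foldl (fun res d =>
      let xx := p.1 + d.1
      let yy := p.2 + d.2.1
      if 0 ≤ xx ∧ xx < 4 ∧ 0 ≤ yy ∧ yy < 3 ∧ gridAt xx yy ≠ "#" ∧
         min p.1 q.1 ≤ xx ∧ xx ≤ max p.1 q.1 ∧ min p.2 q.2 ≤ yy ∧ yy ≤ max p.2 q.2 then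
        res ++ (calcA fuel (gridAt xx yy) e).map (fun item => d.2.2 ++ item)
      else res) []

def calc_dist_num (s : String) (e : String) : List String := calcA 12 s e

-- ===== PORT B =====
-- simulate one bitmask-described interleaving; none = path steps on the gap (3,0)
def simB (vc hc : String) (dxv dyh : Int) : List Nat → Int → Int → Option String
  | [], _, _ => some ""
  | b :: bs, x, y =>
    let st := if b = 1 then (x + dxv, y, vc) else (x, y + dyh, hc)
    if st.1 = 3 ∧ st.2.1 = 0 then none
    else (simB vc hc dxv dyh bs st.1 st.2.1).map (fun t => st.2.2 ++ t)

def calc_dist_num_alt (s : String) (e : String) : List String :=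
  if s = e then [""] else
  let p := (dicPos1.get? s).getD (0, 0)
  let q := (dicPos1.get? e).getD (0, 0)
  let nh := (q.2 - p.2).natAbs
  let nv := (q.1 - p.1).natAbs
  let hc := if q.2 > p.2 then ">" else "<"
  let vc := if q.1 > p.1 then "v" else "^"
  let dxv : Int := if q.1 > p.1 then 1 else -1
  let dyh : Int := if q.2 > p.2 then 1 else -1
  let n := nh + nv
  (List.range (2 ^ n)).foldl (fun res m =>
    let bits := (List.range n).map (fun i => (m >>> (n - 1 - i)) &&& 1)
    if bits.sum ≠ nv then res
    else match simB vc hc dxv dyh bits p.1 p.2 with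
      | some path => res ++ [path]
      | none => res) []

-- ===== PRECONDITION & SPEC =====
def pvKeys : List String := ["0","1","2","3","4","5","6","7","8","9","A"]

-- Pre_ excludes exactly the inputs where A raises: s ≠ e with s or e not a keypad
-- key (dic_pos1[s] / dic_pos1[e] raises KeyError); for s = e A returns [''] for any s.
def Pre_calc_dist_num (s : String) (e : String) : Prop :=
  s = e ∨ (s ∈ pvKeys ∧ e ∈ pvKeys)
instance (s : String) (e : String) : Decidable (Pre_calc_dist_num s e) := by
  unfold Pre_calc_dist_num; infer_instance

def pvWitness_calc_dist_num : String × String := ("0", "A")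

def Spec_calc_dist_num (s : String) (e : String) (out : List String) : Prop := out = calc_dist_num_alt s e
instance (s : String) (e : String) (out : List String) : Decidable (Spec_calc_dist_num s e out) := by unfold Spec_calc_dist_num; infer_instance

-- ===== CLAIM (what is proved, stated in full; the proofs are below) =====
def Claim_equal_calc_dist_num : Prop := ∀ (s : String) (e : String), Dom_calc_dist_num s e → Pre_calc_dist_num s e → Spec_calc_dist_num s e (calc_dist_num s e)

-- ===== LEMMAS AND PROOFS =====
theorem calc_pairs_eq : ∀ s ∈ pvKeys, ∀ e ∈ pvKeys, calc_dist_num s e = calc_dist_num_alt s e := by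
  decide

-- ===== VERDICT (by name: the statement is the Claim_ definition above) =====
theorem calc_dist_num_spec : Claim_equal_calc_dist_num := by
  intro s e _ hpre
  unfold Spec_calc_dist_num
  rcases hpre with rfl | ⟨hs, he⟩
  · simp [calc_dist_num, calcA, calc_dist_num_alt]
  · exact calc_pairs_eq s hs e he
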